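-- pv_equiv track=rewrite | github.com/lukmdo/code4gcj | 2012/Bdancing.py | dancer_selector
-- ===== SOURCE A (Python) =====
-- def dancer_selector(n_googlers, n_surprising, min_score, totals):
--     n_googlers_pass = 0
--     for t in sorted(totals, reverse=True):
--         div, mod = divmod(t, 3)
--         if t == 0 and min_score > 0:
--             continue
--         if min_score <= div:
--             n_googlers_pass += 1
--             continue
--
--         if mod == 0:
--             if min_score == div + 1 and n_surprising and (div-1) >= 0:
--                 n_surprising -= 1
--                 n_googlers_pass += 1
--         elif mod == 1:
--             if min_score == div + 1:
--                 n_googlers_pass += 1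
--         elif mod == 2:
--             if min_score == div + 1:
--                 n_googlers_pass += 1
--             elif min_score == div + 2 and n_surprising:
--                 n_surprising -= 1
--                 n_googlers_pass += 1
--
--     return n_googlers_pass
-- ===== SOURCE B (Python) =====
-- def dancer_selector(n_googlers, n_surprising, min_score, totals):
--     # One unsorted pass: count unconditional passes and those needing a surprising
--     # score, then add min(budget, needed).
--     unconditional = 0
--     needs_surprise = 0
--     for t in totals:
--         div, mod = t // 3, t % 3
--         if min_score <= div or (mod != 0 and min_score == div + 1):
--             unconditional += 1
--         elif (mod == 0 and min_score == div + 1 and div >= 1) or \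
--              (mod == 2 and min_score == div + 2):
--             needs_surprise += 1
--     return unconditional + min(n_surprising, needs_surprise)
-- ===== Notes on version B (the rewrite author's own statement) =====
-- stated objective: faster
-- what changed: Replaced the sort + stateful budget-consuming scan by a single unsorted pass that counts unconditional passes and surprising-needed googlers, then adds min(surprising budget, needed).
-- outside the precondition, e.g. on dancer_selector(2, -1, 2, [3, 3]): A returns 2, B returns -1
import Mathlib
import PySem

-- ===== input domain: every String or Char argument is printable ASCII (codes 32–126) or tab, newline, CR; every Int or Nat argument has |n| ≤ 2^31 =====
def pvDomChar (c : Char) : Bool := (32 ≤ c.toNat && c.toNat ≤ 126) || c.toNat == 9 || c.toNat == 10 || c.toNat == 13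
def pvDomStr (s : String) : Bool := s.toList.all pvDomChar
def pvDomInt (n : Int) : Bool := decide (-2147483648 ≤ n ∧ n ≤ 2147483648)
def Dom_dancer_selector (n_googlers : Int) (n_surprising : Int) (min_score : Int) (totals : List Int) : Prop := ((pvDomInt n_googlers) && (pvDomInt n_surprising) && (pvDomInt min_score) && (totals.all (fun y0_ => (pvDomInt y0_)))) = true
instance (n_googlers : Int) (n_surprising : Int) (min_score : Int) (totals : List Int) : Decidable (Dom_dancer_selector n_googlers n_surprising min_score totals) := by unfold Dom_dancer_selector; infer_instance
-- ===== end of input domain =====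

-- B replaces A's sort + stateful budget-consuming scan by one unsorted counting
-- pass plus min(budget, needed): asymptotically faster (O(n) vs O(n log n)).

-- ===== PORT A =====
-- the loop body of A, on state (n_surprising, n_googlers_pass)
def aStep (min_score : Int) (st : Int × Int) (t : Int) : Int × Int :=
  let dv := PySem.Int.floordiv t 3
  let md := PySem.Int.mod t 3
  if t = 0 ∧ min_score > 0 then st
  else if min_score ≤ dv then (st.1, st.2 + 1)
  else if md = 0 then
    (if min_score = dv + 1 ∧ st.1 ≠ 0 ∧ dv - 1 ≥ 0 then (st.1 - 1, st.2 + 1) else st)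
  else if md = 1 then
    (if min_score = dv + 1 then (st.1, st.2 + 1) else st)
  else if md = 2 then
    (if min_score = dv + 1 then (st.1, st.2 + 1)
     else if min_score = dv + 2 ∧ st.1 ≠ 0 then (st.1 - 1, st.2 + 1) else st)
  else st

def dancer_selector (n_googlers : Int) (n_surprising : Int) (min_score : Int) (totals : List Int) : Int :=
  ((PySem.List.sorted totals (fun x => x) true).foldl (aStep min_score) (n_surprising, 0)).2

-- ===== PORT B =====
-- the loop body of B, on counters (unconditional, needs_surprise)
def bStep (min_score : Int) (c : Int × Int) (t : Int) : Int × Int :=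
  let dv := PySem.Int.floordiv t 3
  let md := PySem.Int.mod t 3
  if min_score ≤ dv ∨ (md ≠ 0 ∧ min_score = dv + 1) then (c.1 + 1, c.2)
  else if (md = 0 ∧ min_score = dv + 1 ∧ dv ≥ 1) ∨ (md = 2 ∧ min_score = dv + 2) then (c.1, c.2 + 1)
  else c

def dancer_selector_alt (n_googlers : Int) (n_surprising : Int) (min_score : Int) (totals : List Int) : Int :=
  let c := totals.foldl (bStep min_score) (0, 0)
  c.1 + min n_surprising c.2

-- ===== PRECONDITION & SPEC =====
-- Pre_ restricts to the natural domain of a nonnegative surprising budget: for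
-- negative n_surprising (which A still returns on) A's truthiness test treats the
-- budget as unlimited, an artefact of 'if n_surprising', while B takes min.
def Pre_dancer_selector (n_googlers : Int) (n_surprising : Int) (min_score : Int) (totals : List Int) : Prop :=
  0 ≤ n_surprising
instance (n_googlers : Int) (n_surprising : Int) (min_score : Int) (totals : List Int) : Decidable (Pre_dancer_selector n_googlers n_surprising min_score totals) := by unfold Pre_dancer_selector; infer_instance

def pvWitness_dancer_selector : Int × Int × Int × List Int := (3, 1, 2, [3, 6, 1])

def Spec_dancer_selector (n_googlers : Int) (n_surprising : Int) (min_score : Int) (totals : List Int) (out : Int) : Prop := out = dancer_selector_alt n_googlers n_surprising min_score totals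
instance (n_googlers : Int) (n_surprising : Int) (min_score : Int) (totals : List Int) (out : Int) : Decidable (Spec_dancer_selector n_googlers n_surprising min_score totals out) := by unfold Spec_dancer_selector; infer_instance

-- ===== CLAIM (what is proved, stated in full; the proofs are below) =====
def Claim_equal_dancer_selector : Prop := ∀ (n_googlers : Int) (n_surprising : Int) (min_score : Int) (totals : List Int), Dom_dancer_selector n_googlers n_surprising min_score totals → Pre_dancer_selector n_googlers n_surprising min_score totals → Spec_dancer_selector n_googlers n_surprising min_score totals (dancer_selector n_googlers n_surprising min_score totals)

-- ===== LEMMAS AND PROOFS =====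

-- classification predicates (used only by the proofs)
def ucondB (ms t : Int) : Bool :=
  decide (ms ≤ PySem.Int.floordiv t 3) ||
  (decide (PySem.Int.mod t 3 ≠ 0) && decide (ms = PySem.Int.floordiv t 3 + 1))

def surpB (ms t : Int) : Bool :=
  !(ucondB ms t) &&
  ((decide (PySem.Int.mod t 3 = 0) && decide (ms = PySem.Int.floordiv t 3 + 1) && decide (PySem.Int.floordiv t 3 ≥ 1)) ||
   (decide (PySem.Int.mod t 3 = 2) && decide (ms = PySem.Int.floordiv t 3 + 2)))

lemma bStep_eq (ms : Int) (c : Int × Int) (t : Int) :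
    bStep ms c t = (c.1 + (if ucondB ms t then 1 else 0), c.2 + (if surpB ms t then 1 else 0)) := by
  simp only [bStep, ucondB, surpB]
  split_ifs with h1 h2 <;> simp_all <;> omega

lemma bfold (ms : Int) (l : List Int) : ∀ c : Int × Int,
    l.foldl (bStep ms) c = (c.1 + (l.countP (ucondB ms) : Int), c.2 + (l.countP (surpB ms) : Int)) := by
  induction l with
  | nil => intro c; simp
  | cons t l ih =>
    intro c
    simp only [List.foldl_cons, ih, bStep_eq, List.countP_cons]
    rw [Prod.mk.injEq]
    push_cast
    constructor <;> ring

lemma mod_bounds (t : Int) : 0 ≤ PySem.Int.mod t 3 ∧ PySem.Int.mod t 3 < 3 := by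
  exact ⟨PySem.Int.mod_nonneg t (by norm_num), PySem.Int.mod_lt t (by norm_num)⟩

lemma zero_arith : PySem.Int.floordiv 0 3 = 0 ∧ PySem.Int.mod 0 3 = 0 := by decide

lemma aStep_cases (ms k p t : Int) (hk : 0 ≤ k) :
    (ucondB ms t = true ∧ aStep ms (k, p) t = (k, p + 1)) ∨
    (ucondB ms t = false ∧ surpB ms t = true ∧
      ((k = 0 ∧ aStep ms (k, p) t = (k, p)) ∨ (0 < k ∧ aStep ms (k, p) t = (k - 1, p + 1)))) ∨
    (ucondB ms t = false ∧ surpB ms t = false ∧ aStep ms (k, p) t = (k, p)) := by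
  have hm := mod_bounds t
  have hz := zero_arith
  simp only [aStep, ucondB, surpB]
  by_cases ht : t = 0 <;> split_ifs <;> simp_all <;> omega

lemma afold (ms : Int) (l : List Int) : ∀ k p : Int, 0 ≤ k →
    (l.foldl (aStep ms) (k, p)).2 =
      p + (l.countP (ucondB ms) : Int) + min k (l.countP (surpB ms) : Int) := by
  induction l with
  | nil => intro k p hk; simp; omega
  | cons t l ih =>
    intro k p hk
    have hs : (0 : Int) ≤ (l.countP (surpB ms) : Int) := Int.natCast_nonneg _
    rcases aStep_cases ms k p t hk with ⟨hu, he⟩ | ⟨hu, hsp, ⟨hk0, he⟩ | ⟨hkpos, he⟩⟩ | ⟨hu, hsp, he⟩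
    · have hsp : surpB ms t = false := by simp [surpB, hu]
      simp only [List.foldl_cons, he, List.countP_cons, hu, hsp]
      rw [ih k (p + 1) hk]; push_cast; omega
    · subst hk0
      simp only [List.foldl_cons, he, List.countP_cons, hu, hsp]
      rw [ih 0 p le_rfl]; push_cast; omega
    · simp only [List.foldl_cons, he, List.countP_cons, hu, hsp]
      rw [ih (k - 1) (p + 1) (by omega)]; push_cast; omega
    · simp only [List.foldl_cons, he, List.countP_cons, hu, hsp]
      rw [ih k p hk]; push_cast; omega

-- ===== VERDICT (by name: the statement is the Claim_ definition above) =====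
theorem dancer_selector_spec : Claim_equal_dancer_selector := by
  intro n_googlers n_surprising min_score totals _ hpre
  unfold Spec_dancer_selector dancer_selector dancer_selector_alt
  rw [afold min_score _ n_surprising 0 hpre, bfold]
  have hperm := PySem.List.sorted_perm totals (fun x => x) true
  rw [hperm.countP_eq (ucondB min_score), hperm.countP_eq (surpB min_score)]
  simp
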